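-- pv_equiv track=rewrite | github.com/leihchen/leetcode | mac/hw36700.py | compress_col_wise
-- ===== SOURCE A (Python) =====
-- def compress_col_wise(matrix):
--     values = []
--     row_index = []
--     col_index = [0]
--     for col in range(len(matrix[0])):
--         for row in range(len(matrix)):
--             if matrix[row][col]:
--                 values.append(matrix[row][col])
--                 row_index.append(row)
--         col_index.append(len(values))
--     return values, row_index, col_index
-- ===== SOURCE B (Python) =====
-- def compress_col_wise(matrix):
--     cols = len(matrix[0])
--     buckets = [[] for _ in range(cols)]
--     for row, r in enumerate(matrix):
--         for col in range(cols):
--             v = r[col]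
--             if v:
--                 buckets[col].append((row, v))
--     values = []
--     row_index = []
--     col_index = [0]
--     for b in buckets:
--         for row, v in b:
--             values.append(v)
--             row_index.append(row)
--         col_index.append(col_index[-1] + len(b))
--     return values, row_index, col_index
-- ===== Notes on version B (the rewrite author's own statement) =====
-- stated objective: alternative
-- what changed: Replaces A's column-major double loop (one full scan of all rows per column) by a single row-major pass that drops each nonzero into a per-column bucket, then concatenates the buckets and emits the column pointers as running prefix sums of bucket lengths.
import Mathlib
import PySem

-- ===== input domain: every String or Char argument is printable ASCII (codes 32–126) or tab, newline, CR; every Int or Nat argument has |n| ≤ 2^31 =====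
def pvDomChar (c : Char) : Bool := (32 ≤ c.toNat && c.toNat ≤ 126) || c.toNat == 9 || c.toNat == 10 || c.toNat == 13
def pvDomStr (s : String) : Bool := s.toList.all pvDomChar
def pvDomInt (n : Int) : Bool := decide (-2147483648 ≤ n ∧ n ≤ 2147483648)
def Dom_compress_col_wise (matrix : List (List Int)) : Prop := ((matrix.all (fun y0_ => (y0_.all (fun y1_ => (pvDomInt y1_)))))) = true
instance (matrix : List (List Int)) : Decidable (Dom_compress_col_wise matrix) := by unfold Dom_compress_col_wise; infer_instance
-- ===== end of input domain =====

-- B replaces A's column-major double scan by one row-major pass into per-column buckets plus a prefix-sum assembly (alternative decomposition, same result).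


-- ===== PORT A =====
def compress_col_wise (matrix : List (List Int)) : List Int × List Int × List Int :=
  (PySem.List.pyRange 0 ((PySem.List.pyGetD matrix 0 []).length : Int) 1).foldl
    (fun (st : List Int × List Int × List Int) col =>
      let st' := (PySem.List.pyRange 0 (matrix.length : Int) 1).foldl
        (fun (st : List Int × List Int × List Int) row =>
          if PySem.List.pyGetD (PySem.List.pyGetD matrix row []) col 0 ≠ 0 then
            (st.1 ++ [PySem.List.pyGetD (PySem.List.pyGetD matrix row []) col 0],
             st.2.1 ++ [row], st.2.2)
          else st) st
      (st'.1, st'.2.1, st'.2.2 ++ [(st'.1.length : Int)]))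
    ([], [], [0])

-- ===== PORT B =====
def compress_col_wise_alt (matrix : List (List Int)) : List Int × List Int × List Int :=
  let cols := (PySem.List.pyGetD matrix 0 []).length
  let buckets := (PySem.List.enumerate matrix 0).foldl
    (fun (bk : List (List (Int × Int))) rowr =>
      (PySem.List.pyRange 0 (cols : Int) 1).foldl
        (fun (bk : List (List (Int × Int))) col =>
          let v := PySem.List.pyGetD rowr.2 col 0
          if v ≠ 0 then
            PySem.List.pySetD bk col (PySem.List.pyGetD bk col [] ++ [(rowr.1, v)])
          else bk) bk)
    (List.replicate cols [])
  buckets.foldl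
    (fun (st : List Int × List Int × List Int) b =>
      let st' := b.foldl
        (fun (st : List Int × List Int × List Int) rv =>
          (st.1 ++ [rv.2], st.2.1 ++ [rv.1], st.2.2)) st
      (st'.1, st'.2.1, st'.2.2 ++ [PySem.List.pyGetD st'.2.2 (-1) 0 + (b.length : Int)]))
    ([], [], [0])

-- ===== PRECONDITION & SPEC =====
-- Pre_ excludes exactly the inputs where the Python raises IndexError: the empty matrix
-- (matrix[0]) and matrices with a row shorter than the first row (matrix[row][col]).
def Pre_compress_col_wise (matrix : List (List Int)) : Prop :=
  matrix ≠ [] ∧ ∀ r ∈ matrix, matrix.headI.length ≤ r.length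
instance (matrix : List (List Int)) : Decidable (Pre_compress_col_wise matrix) := by
  unfold Pre_compress_col_wise; infer_instance
def pvWitness_compress_col_wise : List (List Int) := [[1, 0], [0, 2]]
def Spec_compress_col_wise (matrix : List (List Int)) (out : List Int × List Int × List Int) : Prop := out = compress_col_wise_alt matrix
instance (matrix : List (List Int)) (out : List Int × List Int × List Int) : Decidable (Spec_compress_col_wise matrix out) := by unfold Spec_compress_col_wise; infer_instance

-- ===== CLAIM (what is proved, stated in full; the proofs are below) =====
def Claim_equal_compress_col_wise : Prop := ∀ (matrix : List (List Int)), Dom_compress_col_wise matrix → Pre_compress_col_wise matrix → Spec_compress_col_wise matrix (compress_col_wise matrix)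

-- ===== LEMMAS AND PROOFS =====

-- column `col` of A, in A's own terms: the (row, value) pairs A's inner loop collects
def pvColA (matrix : List (List Int)) (col : Int) : List (Int × Int) :=
  (PySem.List.pyRange 0 (matrix.length : Int) 1).filterMap (fun row =>
    if PySem.List.pyGetD (PySem.List.pyGetD matrix row []) col 0 ≠ 0 then
      some (row, PySem.List.pyGetD (PySem.List.pyGetD matrix row []) col 0)
    else none)

-- column `col` of B, structurally over the rows with running row number s
def pvColE (rows : List (List Int)) (s : Int) (col : Nat) : List (Int × Int) :=
  match rows with
  | [] => []
  | r :: rest =>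
      (if r.getD col 0 ≠ 0 then [(s, r.getD col 0)] else []) ++ pvColE rest (s + 1) col

-- the CSC column pointers: running totals starting at t
def pvMarks (t : Int) : List (List (Int × Int)) → List Int
  | [] => []
  | b :: L => (t + b.length) :: pvMarks (t + b.length) L

lemma A_inner (matrix : List (List Int)) (col : Int) :
    ∀ (L : List Int) (vs rs cs : List Int),
    L.foldl
      (fun (st : List Int × List Int × List Int) row =>
        if PySem.List.pyGetD (PySem.List.pyGetD matrix row []) col 0 ≠ 0 then
          (st.1 ++ [PySem.List.pyGetD (PySem.List.pyGetD matrix row []) col 0],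
           st.2.1 ++ [row], st.2.2)
        else st) (vs, rs, cs)
    = (vs ++ (L.filterMap (fun row =>
          if PySem.List.pyGetD (PySem.List.pyGetD matrix row []) col 0 ≠ 0 then
            some (row, PySem.List.pyGetD (PySem.List.pyGetD matrix row []) col 0)
          else none)).map (·.2),
       rs ++ (L.filterMap (fun row =>
          if PySem.List.pyGetD (PySem.List.pyGetD matrix row []) col 0 ≠ 0 then
            some (row, PySem.List.pyGetD (PySem.List.pyGetD matrix row []) col 0)
          else none)).map (·.1), cs) := by
  intro L
  induction L with
  | nil => intro vs rs cs; simp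
  | cons x L ih =>
      intro vs rs cs
      by_cases h : PySem.List.pyGetD (PySem.List.pyGetD matrix x []) col 0 ≠ 0
      · simp only [List.foldl_cons, List.filterMap_cons, if_pos h]
        rw [ih]; simp
      · simp only [List.foldl_cons, List.filterMap_cons, h]
        rw [ih]; simp at h; simp

lemma A_outer (matrix : List (List Int)) :
    ∀ (C : List Int) (vs rs cs : List Int),
    C.foldl
      (fun (st : List Int × List Int × List Int) col =>
        let st' := (PySem.List.pyRange 0 (matrix.length : Int) 1).foldl
          (fun (st : List Int × List Int × List Int) row =>
            if PySem.List.pyGetD (PySem.List.pyGetD matrix row []) col 0 ≠ 0 then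
              (st.1 ++ [PySem.List.pyGetD (PySem.List.pyGetD matrix row []) col 0],
               st.2.1 ++ [row], st.2.2)
            else st) st
        (st'.1, st'.2.1, st'.2.2 ++ [(st'.1.length : Int)])) (vs, rs, cs)
    = (vs ++ (C.map (pvColA matrix)).flatMap (List.map (·.2)),
       rs ++ (C.map (pvColA matrix)).flatMap (List.map (·.1)),
       cs ++ pvMarks (vs.length : Int) (C.map (pvColA matrix))) := by
  intro C
  induction C with
  | nil => intro vs rs cs; simp [pvMarks]
  | cons c C ih =>
      intro vs rs cs
      simp only [List.foldl_cons, A_inner matrix c]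
      rw [ih]
      simp only [List.map_cons, List.flatMap_cons, pvMarks, pvColA]
      refine Prod.ext ?_ (Prod.ext ?_ ?_) <;> simp [List.append_assoc]

lemma B_assemble :
    ∀ (L : List (List (Int × Int))) (vs rs cs0 : List Int) (t : Int),
    L.foldl
      (fun (st : List Int × List Int × List Int) b =>
        let st' := b.foldl
          (fun (st : List Int × List Int × List Int) rv =>
            (st.1 ++ [rv.2], st.2.1 ++ [rv.1], st.2.2)) st
        (st'.1, st'.2.1, st'.2.2 ++ [PySem.List.pyGetD st'.2.2 (-1) 0 + (b.length : Int)]))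
      (vs, rs, cs0 ++ [t])
    = (vs ++ L.flatMap (List.map (·.2)), rs ++ L.flatMap (List.map (·.1)),
       (cs0 ++ [t]) ++ pvMarks t L) := by
  intro L
  induction L with
  | nil => intro vs rs cs0 t; simp [pvMarks]
  | cons b L ih =>
      intro vs rs cs0 t
      simp only [List.foldl_cons]
      have hb : ∀ (vs rs cs : List Int),
          b.foldl (fun (st : List Int × List Int × List Int) rv =>
            (st.1 ++ [rv.2], st.2.1 ++ [rv.1], st.2.2)) (vs, rs, cs)
          = (vs ++ b.map (·.2), rs ++ b.map (·.1), cs) := by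
        clear ih
        induction b with
        | nil => intro vs rs cs; simp
        | cons x b ihb => intro vs rs cs; simp only [List.foldl_cons]; rw [ihb]; simp
      rw [hb]
      simp only [PySem.List.pyGetD_neg_one_append_singleton]
      have := ih (vs ++ b.map (·.2)) (rs ++ b.map (·.1)) (cs0 ++ [t]) (t + b.length)
      rw [show (cs0 ++ [t]) ++ [t + (b.length : Int)] = (cs0 ++ [t]) ++ [t + (b.length : Int)] from rfl] at this
      rw [this]
      simp [pvMarks, List.append_assoc]

lemma colE_filterMap (c : Nat) :
    ∀ (rows : List (List Int)) (s : Nat),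
    pvColE rows (s : Int) c
    = (List.range rows.length).filterMap (fun k =>
        if (rows.getD k []).getD c 0 ≠ 0 then
          some (((s + k : Nat) : Int), (rows.getD k []).getD c 0)
        else none) := by
  intro rows
  induction rows with
  | nil => intro s; simp [pvColE]
  | cons r rows ih =>
      intro s
      rw [List.length_cons, List.range_succ_eq_map, List.filterMap_cons, List.filterMap_map]
      have hfun : ∀ k ∈ List.range rows.length,
          ((fun k => if ((r :: rows).getD k []).getD c 0 ≠ 0 then
              some (((s + k : Nat) : Int), ((r :: rows).getD k []).getD c 0) else none) ∘ Nat.succ) k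
          = (fun k => if (rows.getD k []).getD c 0 ≠ 0 then
              some ((((s + 1) + k : Nat) : Int), (rows.getD k []).getD c 0) else none) k := by
        intro k _
        simp only [Function.comp, List.getD_cons_succ, Nat.succ_eq_add_one,
          show s + (k + 1) = s + 1 + k from by omega]
      rw [List.filterMap_congr hfun, ← ih (s + 1)]
      have h1 : (((s + 1 : Nat)) : Int) = (s : Int) + 1 := by push_cast; ring
      rw [h1]
      simp only [pvColE, Nat.add_zero, List.getD_cons_zero]
      rcases eq_or_ne (r.getD c 0) 0 with h | h <;>
        rw [List.getD_eq_getElem?_getD] at h <;> simp [h]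

lemma colA_eq_colE (matrix : List (List Int)) (c : Nat) :
    pvColA matrix (c : Int) = pvColE matrix 0 c := by
  rw [pvColA, PySem.List.pyRange_zero_nat, List.filterMap_map]
  have h0 : ((0 : Nat) : Int) = 0 := rfl
  rw [← h0, colE_filterMap]
  apply List.filterMap_congr
  intro k _
  simp [PySem.List.pyGetD_natCast]

lemma B_row (r : List Int) (row : Int) :
    ∀ (C : List Nat) (bk : List (List (Int × Int))),
    C.Nodup → (∀ x ∈ C, x < bk.length) →
    ∃ res,
      (C.map (fun (k : Nat) => (k : Int))).foldl
        (fun (bk : List (List (Int × Int))) col =>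
          let v := PySem.List.pyGetD r col 0
          if v ≠ 0 then
            PySem.List.pySetD bk col (PySem.List.pyGetD bk col [] ++ [(row, v)])
          else bk) bk = res
      ∧ res.length = bk.length
      ∧ ∀ j : Nat, res.getD j [] =
          if j ∈ C then
            bk.getD j [] ++ (if r.getD j 0 ≠ 0 then [(row, r.getD j 0)] else [])
          else bk.getD j [] := by
  intro C
  induction C with
  | nil => intro bk _ _; exact ⟨bk, rfl, rfl, by intro j; simp⟩
  | cons c C ih =>
      intro bk hnd hlt
      have hc : c < bk.length := hlt c (by simp)
      have hnd' : C.Nodup := (List.nodup_cons.mp hnd).2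
      have hcn : c ∉ C := (List.nodup_cons.mp hnd).1
      set bk' : List (List (Int × Int)) :=
        if r.getD c 0 ≠ 0 then bk.set c (bk.getD c [] ++ [(row, r.getD c 0)]) else bk with hbk'
      have hlen' : bk'.length = bk.length := by
        rw [hbk']; split_ifs <;> simp
      obtain ⟨res, hres, hlen, hget⟩ := ih bk' hnd' (by rw [hlen']; intro x hx; exact hlt x (by simp [hx]))
      have hne : ∀ j : Nat, j ≠ c → bk'.getD j [] = bk.getD j [] := by
        intro j hj
        rw [hbk']
        split_ifs with hv
        · rw [List.getD_eq_getElem?_getD, List.getElem?_set_ne (by omega),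
            ← List.getD_eq_getElem?_getD]
        · rfl
      have hceq : bk'.getD c [] = bk.getD c [] ++ (if r.getD c 0 ≠ 0 then [(row, r.getD c 0)] else []) := by
        rw [hbk']
        split_ifs with hv
        · simp [List.getD_eq_getElem?_getD, hc]
        · simp
      refine ⟨res, ?_, by rw [hlen, hlen'], ?_⟩
      · rw [← hres]
        simp only [List.map_cons, List.foldl_cons]
        congr 1
        rw [hbk']
        simp [PySem.List.pyGetD_natCast, PySem.List.pySetD_natCast]
      · intro j
        rw [hget j]
        by_cases hjc : j = c
        · subst hjc
          rw [if_neg hcn, hceq, if_pos (List.mem_cons_self)]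
        · rw [hne j hjc]
          by_cases hj : j ∈ C
          · rw [if_pos hj, if_pos (show j ∈ c :: C from List.mem_cons_of_mem _ hj)]
          · rw [if_neg hj, if_neg (show j ∉ c :: C from by simp [hj, hjc])]

lemma B_build (cols : Nat) :
    ∀ (rows : List (List Int)) (s : Int) (bk : List (List (Int × Int))),
    bk.length = cols →
    ∃ res,
      (PySem.List.enumerate rows s).foldl
        (fun (bk : List (List (Int × Int))) rowr =>
          (PySem.List.pyRange 0 (cols : Int) 1).foldl
            (fun (bk : List (List (Int × Int))) col =>
              let v := PySem.List.pyGetD rowr.2 col 0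
              if v ≠ 0 then
                PySem.List.pySetD bk col (PySem.List.pyGetD bk col [] ++ [(rowr.1, v)])
              else bk) bk) bk = res
      ∧ res.length = cols
      ∧ ∀ j : Nat, j < cols → res.getD j [] = bk.getD j [] ++ pvColE rows s j := by
  intro rows
  induction rows with
  | nil => intro s bk hlen; exact ⟨bk, by simp [PySem.List.enumerate], hlen, by intro j _; simp [pvColE]⟩
  | cons r rows ih =>
      intro s bk hlen
      rw [PySem.List.enumerate_cons]
      simp only [List.foldl_cons]
      obtain ⟨res1, hres1, hlen1, hget1⟩ :=
        B_row r s (List.range cols) bk List.nodup_range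
          (by intro x hx; rw [hlen]; exact List.mem_range.mp hx)
      have hres1' : (PySem.List.pyRange 0 (cols : Int) 1).foldl
          (fun (bk : List (List (Int × Int))) col =>
            let v := PySem.List.pyGetD r col 0
            if v ≠ 0 then
              PySem.List.pySetD bk col (PySem.List.pyGetD bk col [] ++ [(s, v)])
            else bk) bk = res1 := by
        rw [PySem.List.pyRange_zero_nat]
        exact hres1
      obtain ⟨res, hres, hlenr, hget⟩ := ih (s + 1) res1 (by rw [hlen1, hlen])
      refine ⟨res, ?_, hlenr, ?_⟩
      · rw [← hres, ← hres1']
      · intro j hj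
        rw [hget j hj, hget1 j]
        simp only [List.mem_range, hj, if_pos]
        simp [pvColE, List.append_assoc]

lemma buckets_eq (matrix : List (List Int)) :
    (PySem.List.enumerate matrix 0).foldl
        (fun (bk : List (List (Int × Int))) rowr =>
          (PySem.List.pyRange 0 (((PySem.List.pyGetD matrix 0 []).length : Nat) : Int) 1).foldl
            (fun (bk : List (List (Int × Int))) col =>
              let v := PySem.List.pyGetD rowr.2 col 0
              if v ≠ 0 then
                PySem.List.pySetD bk col (PySem.List.pyGetD bk col [] ++ [(rowr.1, v)])
              else bk) bk) (List.replicate (PySem.List.pyGetD matrix 0 []).length [])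
    = (PySem.List.pyRange 0 ((PySem.List.pyGetD matrix 0 []).length : Int) 1).map (pvColA matrix) := by
  set n := (PySem.List.pyGetD matrix 0 []).length with hn
  obtain ⟨res, hres, hlen, hget⟩ := B_build n matrix 0 (List.replicate n []) (by simp)
  rw [hres]
  rw [PySem.List.pyRange_zero_nat, List.map_map]
  apply List.ext_getElem
  · rw [hlen]; simp
  · intro i h1 h2
    have hi : i < n := by simpa using h2
    have := hget i hi
    rw [List.getD_eq_getElem?_getD, List.getElem?_eq_getElem h1] at this
    simp only [Option.getD_some] at this
    rw [this]
    simp [colA_eq_colE, Function.comp, hi]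

-- ===== VERDICT (by name: the statement is the Claim_ definition above) =====
theorem compress_col_wise_spec : Claim_equal_compress_col_wise := by
  intro matrix _ _
  show compress_col_wise matrix = compress_col_wise_alt matrix
  have hA := A_outer matrix
    (PySem.List.pyRange 0 ((PySem.List.pyGetD matrix 0 []).length : Int) 1) [] [] [0]
  have hB : compress_col_wise_alt matrix
      = (((PySem.List.pyRange 0 ((PySem.List.pyGetD matrix 0 []).length : Int) 1).map
            (pvColA matrix)).flatMap (List.map (·.2)),
         ((PySem.List.pyRange 0 ((PySem.List.pyGetD matrix 0 []).length : Int) 1).map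
            (pvColA matrix)).flatMap (List.map (·.1)),
         ([] ++ [(0 : Int)]) ++ pvMarks 0
           ((PySem.List.pyRange 0 ((PySem.List.pyGetD matrix 0 []).length : Int) 1).map
            (pvColA matrix))) := by
    show
      ((PySem.List.enumerate matrix 0).foldl
        (fun (bk : List (List (Int × Int))) rowr =>
          (PySem.List.pyRange 0 (((PySem.List.pyGetD matrix 0 []).length : Nat) : Int) 1).foldl
            (fun (bk : List (List (Int × Int))) col =>
              let v := PySem.List.pyGetD rowr.2 col 0
              if v ≠ 0 then
                PySem.List.pySetD bk col (PySem.List.pyGetD bk col [] ++ [(rowr.1, v)])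
              else bk) bk)
        (List.replicate (PySem.List.pyGetD matrix 0 []).length [])).foldl
        (fun (st : List Int × List Int × List Int) b =>
          let st' := b.foldl
            (fun (st : List Int × List Int × List Int) rv =>
              (st.1 ++ [rv.2], st.2.1 ++ [rv.1], st.2.2)) st
          (st'.1, st'.2.1, st'.2.2 ++ [PySem.List.pyGetD st'.2.2 (-1) 0 + (b.length : Int)]))
        ([], [], [0]) = _
    rw [buckets_eq matrix]
    exact B_assemble _ [] [] [] 0
  rw [hB]
  refine hA.trans ?_
  simp
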